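-- pv_equiv track=rewrite | github.com/timorohrer/pm4py-mdl | pm4pymdl/visualization/mvp/gen_framework2/versions/util.py | get_objects_edges_map
-- ===== SOURCE A (Python) =====
-- from collections import Counter
--
-- def get_objects_edges_map(key, res):
--     edges = [x for x in res["edges"] if x[0] == key]
--     edges_map = {}
--     for x in edges:
--         k = (x[1], x[2])
--         if k not in edges_map:
--             edges_map[k] = Counter()
--         edges_map[k][x[5]] += res["edges"][x]
--     for k in edges_map:
--         edges_map[k] = len(edges_map[k])
--     return edges_map
-- ===== SOURCE B (Python) =====
-- from collections import Counter
--
-- def get_objects_edges_map(key, res):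
--     triples = {(x[1], x[2], x[5]) for x in res["edges"] if x[0] == key}
--     return dict(Counter((t[0], t[1]) for t in triples))
-- ===== Notes on version B (the rewrite author's own statement) =====
-- stated objective: simpler
-- what changed: Replaces the nested dict-of-Counters accumulation plus a second len-rewrite pass by a flat set comprehension deduplicating (source,target,value) triples followed by one Counter over their (source,target) pairs.
import Mathlib
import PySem

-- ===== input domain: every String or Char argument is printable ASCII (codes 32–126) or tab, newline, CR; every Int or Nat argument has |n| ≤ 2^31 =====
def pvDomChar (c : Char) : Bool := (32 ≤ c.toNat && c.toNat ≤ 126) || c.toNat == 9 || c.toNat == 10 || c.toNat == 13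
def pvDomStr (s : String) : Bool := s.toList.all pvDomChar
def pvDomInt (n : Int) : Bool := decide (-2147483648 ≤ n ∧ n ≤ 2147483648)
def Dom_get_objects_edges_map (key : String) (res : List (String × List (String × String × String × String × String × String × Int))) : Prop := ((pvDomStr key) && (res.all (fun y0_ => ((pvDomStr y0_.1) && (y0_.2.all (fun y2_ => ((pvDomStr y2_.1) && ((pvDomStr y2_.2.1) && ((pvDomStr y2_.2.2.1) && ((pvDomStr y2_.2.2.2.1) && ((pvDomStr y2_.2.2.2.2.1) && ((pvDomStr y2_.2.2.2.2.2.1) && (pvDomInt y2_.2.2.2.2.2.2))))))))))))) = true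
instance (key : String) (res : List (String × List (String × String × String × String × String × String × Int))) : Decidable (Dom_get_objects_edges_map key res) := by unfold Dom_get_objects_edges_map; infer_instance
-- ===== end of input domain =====

-- B replaces A's nested dict-of-Counters accumulation (plus a len rewrite pass) by a flat dedup
-- set of (x1,x2,x5) triples followed by one Counter over their (x1,x2) pairs (objective: simpler).

-- res : dict "edges" ↦ (dict (6-string tuple) ↦ int), flattened per the type convention.
-- the 6-tuple key of a 7-tuple entry
def pvKey6 (t : String × String × String × String × String × String × Int) :
    String × String × String × String × String × String :=
  (t.1, t.2.1, t.2.2.1, t.2.2.2.1, t.2.2.2.2.1, t.2.2.2.2.2.1)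

-- ===== PORT A =====
def get_objects_edges_map (key : String) (res : List (String × List (String × String × String × String × String × String × Int))) : List (String × String × Int) :=
  match PySem.Dict.get? (PySem.Dict.mk res) "edges" with
  | none => []  -- KeyError: excluded by Pre_
  | some es =>
    -- the inner dict res["edges"], for the value lookup res["edges"][x]
    let ed : PySem.Dict (String × String × String × String × String × String) Int :=
      PySem.Dict.mk (es.map (fun t => (pvKey6 t, t.2.2.2.2.2.2)))
    -- edges = [x for x in res["edges"] if x[0] == key]   (iterating a dict yields its keys)
    let edges := (es.map pvKey6).filter (fun x => x.1 == key)
    let em : PySem.Dict (String × String) (PySem.Dict String Int) :=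
      edges.foldl (fun m x =>
        let k := (x.2.1, x.2.2.1)
        let m := if m.contains k then m else m.insert k PySem.Dict.empty
        m.insert k ((m.getD k PySem.Dict.empty).modify x.2.2.2.2.2 0 (· + ed.getD x 0)))
        PySem.Dict.empty
    -- for k in edges_map: edges_map[k] = len(edges_map[k])  (in-place rewrite keeps order)
    em.items.map (fun p => (p.1.1, p.1.2, (p.2.size : Int)))

-- ===== PORT B =====
def get_objects_edges_map_alt (key : String) (res : List (String × List (String × String × String × String × String × String × Int))) : List (String × String × Int) :=
  match PySem.Dict.get? (PySem.Dict.mk res) "edges" with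
  | none => []  -- KeyError: excluded by Pre_
  | some es =>
    -- triples = {(x[1], x[2], x[5]) for x in res["edges"] if x[0] == key}
    let triples : PySem.Set (String × String × String) :=
      PySem.Set.ofList (((es.map pvKey6).filter (fun x => x.1 == key)).map
        (fun x => (x.2.1, x.2.2.1, x.2.2.2.2.2)))
    -- dict(Counter((t[0], t[1]) for t in triples))
    let c : PySem.Dict (String × String) Int :=
      PySem.Dict.counter (triples.map (fun t => (t.1, t.2.1)))
    c.items.map (fun p => (p.1.1, p.1.2, p.2))

-- ===== PRECONDITION & SPEC =====
-- Pre_ excludes exactly the inputs without an "edges" key, on which A raises KeyError.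
def Pre_get_objects_edges_map (key : String) (res : List (String × List (String × String × String × String × String × String × Int))) : Prop :=
  PySem.Dict.contains (PySem.Dict.mk res) "edges" = true
instance (key : String) (res : List (String × List (String × String × String × String × String × String × Int))) : Decidable (Pre_get_objects_edges_map key res) := by unfold Pre_get_objects_edges_map; infer_instance

def pvWitness_get_objects_edges_map : String × (List (String × List (String × String × String × String × String × String × Int))) :=
  ("o", [("edges", [("o", "a", "b", "c", "d", "v1", 2), ("o", "a", "b", "c", "e", "v2", 1), ("p", "a", "b", "c", "d", "v1", 1)])])

def Spec_get_objects_edges_map (key : String) (res : List (String × List (String × String × String × String × String × String × Int))) (out : List (String × String × Int)) : Prop := out = get_objects_edges_map_alt key res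
instance (key : String) (res : List (String × List (String × String × String × String × String × String × Int))) (out : List (String × String × Int)) : Decidable (Spec_get_objects_edges_map key res out) := by unfold Spec_get_objects_edges_map; infer_instance

-- ===== CLAIM (what is proved, stated in full; the proofs are below) =====
def Claim_equal_get_objects_edges_map : Prop := ∀ (key : String) (res : List (String × List (String × String × String × String × String × String × Int))), Dom_get_objects_edges_map key res → Pre_get_objects_edges_map key res → Spec_get_objects_edges_map key res (get_objects_edges_map key res)

-- ===== LEMMAS AND PROOFS =====


theorem pv_ofList_map_inj {α β : Type} [BEq α] [LawfulBEq α] [BEq β] [LawfulBEq β]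
    (f : α → β) (hf : Function.Injective f) (l : List α) :
    PySem.Set.ofList (l.map f) = (PySem.Set.ofList l).map f := by
  induction l using List.reverseRecOn with
  | nil => simp [PySem.Set.ofList_nil]
  | append_singleton xs x ih =>
    rw [List.map_append, List.map_singleton, PySem.Set.ofList_append_singleton, ih,
        PySem.Set.ofList_append_singleton]
    by_cases hx : x ∈ PySem.Set.ofList xs
    · rw [PySem.Set.add_of_mem hx, PySem.Set.add_of_mem (List.mem_map_of_mem hx)]
    · rw [PySem.Set.add_of_not_mem hx, PySem.Set.add_of_not_mem (by
        intro hm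
        obtain ⟨y, hy, hxy⟩ := List.mem_map.mp hm
        exact hx (hf hxy ▸ hy)), List.map_append, List.map_singleton]

theorem pv_ofList_filter {α : Type} [BEq α] [LawfulBEq α] (q : α → Bool) (l : List α) :
    PySem.Set.ofList (l.filter q) = (PySem.Set.ofList l).filter q := by
  induction l using List.reverseRecOn with
  | nil => simp [PySem.Set.ofList_nil]
  | append_singleton xs x ih =>
    rw [List.filter_append, PySem.Set.ofList_append_singleton]
    by_cases hx : x ∈ PySem.Set.ofList xs
    · rw [PySem.Set.add_of_mem hx]
      by_cases hq : q x
      · have : x ∈ (PySem.Set.ofList xs).filter q := List.mem_filter.mpr ⟨hx, hq⟩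
        simp [hq, PySem.Set.ofList_append_singleton, PySem.Set.add_of_mem, ih, this]
      · simp [hq, ih]
    · rw [PySem.Set.add_of_not_mem hx, List.filter_append]
      by_cases hq : q x
      · have hnx : x ∉ (PySem.Set.ofList xs).filter q := fun h => hx (List.mem_filter.mp h).1
        simp [hq, PySem.Set.ofList_append_singleton, PySem.Set.add_of_not_mem hnx, ih]
      · simp [hq, ih]

theorem pv_ofList_map_ofList {α β : Type} [BEq α] [LawfulBEq α] [BEq β] [LawfulBEq β]
    (f : α → β) (l : List α) :
    PySem.Set.ofList ((PySem.Set.ofList l).map f) = PySem.Set.ofList (l.map f) := by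
  induction l using List.reverseRecOn with
  | nil => simp [PySem.Set.ofList_nil]
  | append_singleton xs x ih =>
    rw [PySem.Set.ofList_append_singleton, List.map_append, List.map_singleton,
        PySem.Set.ofList_append_singleton, ← ih]
    by_cases hx : x ∈ PySem.Set.ofList xs
    · rw [PySem.Set.add_of_mem hx,
        PySem.Set.add_of_mem ((PySem.Set.mem_ofList _ _).mpr (List.mem_map_of_mem hx))]
    · rw [PySem.Set.add_of_not_mem hx, List.map_append, List.map_singleton,
        PySem.Set.ofList_append_singleton]



def pvPair (x : String × String × String × String × String × String) : String × String := (x.2.1, x.2.2.1)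
def pvX5 (x : String × String × String × String × String × String) : String := x.2.2.2.2.2
def pvTrip (x : String × String × String × String × String × String) : String × String × String := (x.2.1, x.2.2.1, x.2.2.2.2.2)

def pvInner (v : (String × String × String × String × String × String) → Int)
    (k : String × String) (L : List (String × String × String × String × String × String)) :
    PySem.Dict String Int :=
  (L.filter (fun x => pvPair x == k)).foldl (fun c x => c.modify (pvX5 x) 0 (· + v x)) PySem.Dict.empty

theorem pvInner_append_self (v : (String × String × String × String × String × String) → Int)
    (x : String × String × String × String × String × String)
    (L : List (String × String × String × String × String × String)) :
    pvInner v (pvPair x) (L ++ [x]) = (pvInner v (pvPair x) L).modify (pvX5 x) 0 (· + v x) := by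
  unfold pvInner
  rw [List.filter_append, List.foldl_append]
  simp

theorem pvInner_append_ne (v : (String × String × String × String × String × String) → Int)
    (x : String × String × String × String × String × String) (k : String × String)
    (hkx : k ≠ pvPair x)
    (L : List (String × String × String × String × String × String)) :
    pvInner v k (L ++ [x]) = pvInner v k L := by
  unfold pvInner
  rw [List.filter_append]
  have : (pvPair x == k) = false := beq_eq_false_iff_ne.mpr (Ne.symm hkx)
  simp [this]

theorem pv_itemsA (v : (String × String × String × String × String × String) → Int)
    (L : List (String × String × String × String × String × String)) :
    (L.foldl (fun m x =>
        let k := (x.2.1, x.2.2.1)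
        let m := if m.contains k then m else m.insert k PySem.Dict.empty
        m.insert k ((m.getD k PySem.Dict.empty).modify x.2.2.2.2.2 0 (· + v x)))
        PySem.Dict.empty).items
    = (PySem.Set.ofList (L.map pvPair)).map (fun k => (k, pvInner v k L)) := by
  induction L using List.reverseRecOn with
  | nil => simp [PySem.Set.ofList_nil]; rfl
  | append_singleton L x ih =>
    rw [List.foldl_append, List.foldl_cons, List.foldl_nil]
    set M := (L.foldl (fun m x =>
        let k := (x.2.1, x.2.2.1)
        let m := if m.contains k then m else m.insert k PySem.Dict.empty
        m.insert k ((m.getD k PySem.Dict.empty).modify x.2.2.2.2.2 0 (· + v x)))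
        PySem.Dict.empty) with hM
    have hkeys : M.keys = PySem.Set.ofList (L.map pvPair) := by
      show M.items.map (·.1) = _
      rw [ih, List.map_map]
      have : ((·.1) ∘ fun k => (k, pvInner v k L)) = id := rfl
      rw [this, List.map_id]
    have hnd : M.keys.Nodup := by rw [hkeys]; exact PySem.Set.nodup_ofList _
    rw [List.map_append, List.map_singleton, PySem.Set.ofList_append_singleton]
    dsimp only
    rw [show (x.2.1, x.2.2.1) = pvPair x from rfl, show x.2.2.2.2.2 = pvX5 x from rfl]
    by_cases hmem : pvPair x ∈ PySem.Set.ofList (L.map pvPair)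
    · have hc : M.contains (pvPair x) = true :=
        PySem.Dict.contains_iff_mem_keys M _ |>.mpr (by rw [hkeys]; exact hmem)
      rw [hc]
      simp only [if_true]
      have hin : (pvPair x, pvInner v (pvPair x) L) ∈ M.items := by
        rw [ih]; exact List.mem_map_of_mem hmem
      have hgetD : M.getD (pvPair x) PySem.Dict.empty = pvInner v (pvPair x) L :=
        PySem.Dict.getD_of_mem_items M hin hnd _
      rw [hgetD, PySem.Dict.items_insert_of_contains M _ hc, ih, List.map_map,
          PySem.Set.add_of_mem hmem]
      apply List.map_congr_left
      intro k hk
      simp only [Function.comp_apply]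
      by_cases hkx : k = pvPair x
      · subst hkx
        rw [if_pos (by simp), pvInner_append_self]
      · have hbeq : (k == pvPair x) = false := beq_eq_false_iff_ne.mpr hkx
        rw [if_neg (by simp [hbeq]), pvInner_append_ne v x k hkx]
    · have hc : M.contains (pvPair x) = false := by
        apply Bool.eq_false_iff.mpr
        intro h
        exact hmem (by rw [← hkeys]; exact (PySem.Dict.contains_iff_mem_keys M _).mp h)
      rw [hc]
      simp only [Bool.false_eq_true, if_false]
      rw [PySem.Dict.getD_insert_self, PySem.Dict.insert_insert_self,
          PySem.Dict.items_insert_of_not_contains M _ hc, ih,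
          PySem.Set.add_of_not_mem hmem, List.map_append, List.map_singleton]
      congr 1
      · apply List.map_congr_left
        intro k hk
        have hkx : k ≠ pvPair x := fun h => hmem (h ▸ hk)
        rw [pvInner_append_ne v x k hkx]
      · have hfil : L.filter (fun y => pvPair y == pvPair x) = [] := by
          rw [List.filter_eq_nil_iff]
          intro y hy hbeq
          exact hmem ((eq_of_beq hbeq) ▸ (PySem.Set.mem_ofList _ _).mpr (List.mem_map_of_mem hy))
        have : pvInner v (pvPair x) (L ++ [x]) =
            PySem.Dict.empty.modify (pvX5 x) 0 (· + v x) := by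
          unfold pvInner
          rw [List.filter_append, hfil]
          simp
        rw [this]

theorem pvInner_keys (v : (String × String × String × String × String × String) → Int)
    (k : String × String) (L : List (String × String × String × String × String × String)) :
    (pvInner v k L).keys = PySem.Set.ofList ((L.filter (fun x => pvPair x == k)).map pvX5) := by
  unfold pvInner
  rw [PySem.Dict.keys_foldl_modify_key _ pvX5]
  simp [PySem.Set.update_nil_left, PySem.Dict.keys_empty]


theorem pv_count (k : String × String) (L : List (String × String × String × String × String × String)) (v : (String × String × String × String × String × String) → Int) :
    ((pvInner v k L).size : Int)
    = (((PySem.Set.ofList (L.map pvTrip)).map (fun t : String × String × String => (t.1, t.2.1))).count k : Int) := by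
  have hsize : (pvInner v k L).size = (pvInner v k L).keys.length := by
    show (pvInner v k L).items.length = ((pvInner v k L).items.map (·.1)).length
    rw [List.length_map]
  rw [hsize, pvInner_keys]
  rw [List.count_eq_countP, List.countP_map, List.countP_eq_length_filter,
      ← pv_ofList_filter]
  have hfm : (L.map pvTrip).filter ((fun a => a == k) ∘ (fun t => (t.1, t.2.1)))
      = (L.filter (fun x => pvPair x == k)).map pvTrip := by
    rw [List.filter_map]
    rfl
  rw [hfm]
  have hmc : (L.filter (fun x => pvPair x == k)).map pvTrip
      = (L.filter (fun x => pvPair x == k)).map ((fun s => (k.1, k.2, s)) ∘ pvX5) := by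
    apply List.map_congr_left
    intro y hy
    have : pvPair y = k := eq_of_beq (List.mem_filter.mp hy).2
    show pvTrip y = (k.1, k.2, pvX5 y)
    rw [← this]
    rfl
  rw [hmc, ← List.map_map, pv_ofList_map_inj (fun s => (k.1, k.2, s))
      (fun a b h => congrArg (·.2.2) h), List.length_map]


theorem pv_main (v : (String × String × String × String × String × String) → Int)
    (L : List (String × String × String × String × String × String)) :
    ((L.foldl (fun m x =>
        let k := (x.2.1, x.2.2.1)
        let m := if m.contains k then m else m.insert k PySem.Dict.empty
        m.insert k ((m.getD k PySem.Dict.empty).modify x.2.2.2.2.2 0 (· + v x)))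
        PySem.Dict.empty).items.map (fun p => (p.1.1, p.1.2, (p.2.size : Int))))
    = (PySem.Dict.counter ((PySem.Set.ofList (L.map pvTrip)).map (fun t : String × String × String => (t.1, t.2.1)))).items.map
        (fun p => (p.1.1, p.1.2, p.2)) := by
  have hcomp : ((fun t : String × String × String => (t.1, t.2.1)) ∘ pvTrip) = pvPair := by
    funext x; rfl
  have h1 : (L.map pvTrip).map (fun t : String × String × String => (t.1, t.2.1)) = L.map pvPair := by
    rw [List.map_map, hcomp]
  rw [pv_itemsA, PySem.Dict.items_counter, pv_ofList_map_ofList, h1, List.map_map, List.map_map]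
  apply List.map_congr_left
  intro k hk
  simp only [Function.comp_apply]
  exact congrArg (fun z => (k.1, k.2, z)) (pv_count k L v)

-- ===== VERDICT (by name: the statement is the Claim_ definition above) =====
theorem get_objects_edges_map_spec : Claim_equal_get_objects_edges_map := by
  intro key res _ hpre
  unfold Pre_get_objects_edges_map at hpre
  unfold Spec_get_objects_edges_map get_objects_edges_map get_objects_edges_map_alt
  cases h : PySem.Dict.get? (PySem.Dict.mk res) "edges" with
  | none =>
    rw [PySem.Dict.contains_eq_isSome_get?, h] at hpre
  | some es =>
    dsimp only
    exact pv_main (fun x => (PySem.Dict.mk (es.map (fun t => (pvKey6 t, t.2.2.2.2.2.2)))).getD x 0)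
      ((es.map pvKey6).filter (fun x => x.1 == key))
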